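-- pv_equiv track=rewrite | github.com/NickDaemon/GuiasIntroP | guia7.py | filas_ordenadas
-- ===== SOURCE A (Python) =====
-- def ordenados(lista:list[int]) -> bool:
--     res:bool=True
--     for i in range(len(lista)-1):
--         if lista[i] > lista[i+1]:
--             res:bool=False
--     return res
--
-- def filas_ordenadas(m:list[list[int]]) -> list[bool]:
--     res:list[bool]=[]
--     for lista in m:
--         if ordenados(lista):
--             res.append(True)
--         else:
--             res.append(False)
--     return res
-- ===== SOURCE B (Python) =====
-- def filas_ordenadas(m: list[list[int]]) -> list[bool]:
--     return [row == sorted(row) for row in m]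
-- ===== Notes on version B (the rewrite author's own statement) =====
-- stated objective: idiomatic
-- what changed: Replaces the per-row adjacent-pair index scan with a sort-then-compare: each row is compared to its sorted copy.
import Mathlib
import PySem

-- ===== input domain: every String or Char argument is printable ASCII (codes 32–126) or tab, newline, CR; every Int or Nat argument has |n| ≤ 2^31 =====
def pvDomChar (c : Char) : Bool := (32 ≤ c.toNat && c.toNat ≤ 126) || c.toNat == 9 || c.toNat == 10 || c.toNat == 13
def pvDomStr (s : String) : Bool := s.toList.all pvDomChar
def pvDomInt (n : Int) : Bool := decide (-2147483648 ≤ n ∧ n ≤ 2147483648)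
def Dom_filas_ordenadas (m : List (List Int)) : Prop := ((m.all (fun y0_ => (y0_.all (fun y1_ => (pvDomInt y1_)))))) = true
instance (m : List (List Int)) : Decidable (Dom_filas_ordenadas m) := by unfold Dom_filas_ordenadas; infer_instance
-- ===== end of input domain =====

-- ===== PORT A =====
-- B: sort-then-compare per row instead of A's adjacent-pair index scan (idiomatic alternative).
def ordenados (lista : List Int) : Bool :=
  (PySem.List.pyRange 0 ((lista.length : Int) - 1) 1).foldl
    (fun res i =>
      if PySem.List.pyGetD lista i 0 > PySem.List.pyGetD lista (i + 1) 0 then false else res)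
    true

def filas_ordenadas (m : List (List Int)) : List Bool :=
  m.foldl (fun res lista => if ordenados lista then res ++ [true] else res ++ [false]) []

-- ===== PORT B =====
def filas_ordenadas_alt (m : List (List Int)) : List Bool :=
  m.map (fun row => decide (row = PySem.List.sorted row (fun x => x) false))

-- ===== PRECONDITION & SPEC =====
def Spec_filas_ordenadas (m : List (List Int)) (out : List Bool) : Prop := out = filas_ordenadas_alt m
instance (m : List (List Int)) (out : List Bool) : Decidable (Spec_filas_ordenadas m out) := by unfold Spec_filas_ordenadas; infer_instance

-- ===== CLAIM (what is proved, stated in full; the proofs are below) =====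
def Claim_equal_filas_ordenadas : Prop := ∀ (m : List (List Int)), Dom_filas_ordenadas m → Spec_filas_ordenadas m (filas_ordenadas m)

-- ===== LEMMAS AND PROOFS =====

-- ===== VERDICT (by name: the statement is the Claim_ definition above) =====
-- foldl that can only flip the accumulator to false = 'all' over the list
lemma foldl_if_false {α : Type} (p : α → Prop) [DecidablePred p] (l : List α) (init : Bool) :
    l.foldl (fun r i => if p i then false else r) init = (init && l.all (fun i => !decide (p i))) := by
  induction l generalizing init with
  | nil => simp
  | cons x t ih =>
    simp only [List.foldl_cons, List.all_cons, ih]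
    by_cases h : p x <;> simp [h]

lemma ordenados_eq_pairwise (lista : List Int) :
    ordenados lista = decide (lista.Pairwise (· ≤ ·)) := by
  unfold ordenados
  rw [foldl_if_false (fun i => PySem.List.pyGetD lista i 0 > PySem.List.pyGetD lista (i + 1) 0)]
  simp only [Bool.true_and]
  rcases Bool.eq_false_or_eq_true ((PySem.List.pyRange 0 ((lista.length : Int) - 1) 1).all fun i => !decide (PySem.List.pyGetD lista i 0 > PySem.List.pyGetD lista (i + 1) 0)) with h | h <;> rw [h]
  · rw [eq_comm, decide_eq_true_iff]
    rw [← List.isChain_iff_pairwise, List.isChain_iff_getElem]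
    simp only [List.all_eq_true] at h
    intro i hi
    have := h (i : Int) (by rw [PySem.List.mem_pyRange_one]; omega)
    have h1 : ((i : Int) + 1) = ((i + 1 : Nat) : Int) := by push_cast; ring
    rw [h1] at this
    rw [PySem.List.pyGetD_natCast, PySem.List.pyGetD_natCast] at this
    simp only [Bool.not_eq_true', decide_eq_false_iff_not, not_lt] at this
    simpa [List.getElem?_eq_getElem (show i < lista.length by omega),
           List.getElem?_eq_getElem (show i + 1 < lista.length by omega)] using this
  · rw [eq_comm, decide_eq_false_iff_not]
    simp only [List.all_eq_false] at h
    obtain ⟨i, hi, hp⟩ := h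
    rw [PySem.List.mem_pyRange_one] at hi
    obtain ⟨h0, h1⟩ := hi
    rw [PySem.List.pyGetD_eq_getElem _ _ h0 (by omega),
        PySem.List.pyGetD_eq_getElem _ _ (by omega) (by omega)] at hp
    intro hP
    rw [← List.isChain_iff_pairwise, List.isChain_iff_getElem] at hP
    simp only [Bool.not_eq_true', decide_eq_false_iff_not, not_not] at hp
    have := hP i.toNat (by omega)
    have hii : lista[(i + 1).toNat]'(by omega) = lista[i.toNat + 1]'(by omega) := by
      congr 1
      omega
    rw [hii] at hp
    omega

lemma sorted_eq_self_iff (row : List Int) :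
    (row = PySem.List.sorted row (fun x => x) false) ↔ row.Pairwise (· ≤ ·) := by
  constructor
  · intro h
    have := PySem.List.sorted_pairwise row (fun x => x)
    rw [← h] at this
    exact this
  · intro h
    exact (PySem.List.sorted_eq_self_of_pairwise _ (fun x => x) h).symm

theorem filas_ordenadas_spec : Claim_equal_filas_ordenadas := by
  intro m _
  unfold Spec_filas_ordenadas filas_ordenadas filas_ordenadas_alt
  have hf : (fun (res : List Bool) lista => if ordenados lista = true then res ++ [true] else res ++ [false])
      = (fun (res : List Bool) lista => res ++ [ordenados lista]) := by
    funext res lista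
    by_cases h : ordenados lista = true <;> simp [h]
  rw [hf, PySem.List.foldl_append_singleton_eq_map]
  simp only [List.nil_append]
  refine List.map_congr_left ?_
  intro row _
  rw [ordenados_eq_pairwise]
  exact decide_eq_decide.mpr (sorted_eq_self_iff row).symm
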